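-- pv_equiv track=rewrite | github.com/s1mplethings/ctcp | generated_projects/vtuber_highlight_local_mvp/src/vtuber_highlight_mvp/detection.py | _group_active_ranges
-- ===== SOURCE A (Python) =====
-- from typing import Any
--
-- def _group_active_ranges(active: list[bool], metrics: list[dict[str, Any]]) -> list[tuple[int, int]]:
--     ranges: list[tuple[int, int]] = []
--     start_idx: int | None = None
--     for idx, flag in enumerate(active):
--         if flag and start_idx is None:
--             start_idx = idx
--         if start_idx is not None and (idx == len(active) - 1 or not active[idx + 1]):
--             end_idx = idx
--             ranges.append((start_idx, end_idx))
--             start_idx = None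
--     return ranges
-- ===== SOURCE B (Python) =====
-- from typing import Any
--
-- def _group_active_ranges(active: list[bool], metrics: list[dict[str, Any]]) -> list[tuple[int, int]]:
--     # Run-chunking: advance a pointer past each maximal run of equal flags,
--     # and emit (run start, run end) for the True runs.
--     ranges: list[tuple[int, int]] = []
--     i = 0
--     n = len(active)
--     while i < n:
--         j = i
--         while j < n and active[j] == active[i]:
--             j += 1
--         if active[i]:
--             ranges.append((i, j - 1))
--         i = j
--     return ranges
-- ===== Notes on version B (the rewrite author's own statement) =====
-- stated objective: alternative
-- what changed: Replaces A's per-element lookahead state machine (optional start index, next-element test) with a two-pointer run-chunking scan that jumps over each maximal run of equal flags and emits endpoints from run boundaries.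
import Mathlib
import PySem

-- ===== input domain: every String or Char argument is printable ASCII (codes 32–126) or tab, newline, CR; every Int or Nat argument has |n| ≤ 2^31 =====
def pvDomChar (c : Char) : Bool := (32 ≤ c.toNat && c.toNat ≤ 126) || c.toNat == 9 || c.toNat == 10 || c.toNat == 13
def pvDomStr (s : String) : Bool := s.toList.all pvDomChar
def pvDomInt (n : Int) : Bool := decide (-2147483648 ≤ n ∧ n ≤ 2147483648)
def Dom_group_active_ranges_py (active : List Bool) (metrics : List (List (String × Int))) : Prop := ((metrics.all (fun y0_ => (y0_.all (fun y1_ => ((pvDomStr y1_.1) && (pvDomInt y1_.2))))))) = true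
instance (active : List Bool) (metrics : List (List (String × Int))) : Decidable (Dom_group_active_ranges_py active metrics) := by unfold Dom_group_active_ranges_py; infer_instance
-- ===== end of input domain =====

-- B replaces A's per-element lookahead state machine with a two-pointer run-chunking
-- scan (alternative decomposition, same O(n) cost); A and B are proved to agree on all inputs.


-- ===== PORT A =====
-- The `for idx, flag in enumerate(active)` loop becomes structural recursion over the
-- remaining list with an explicit index counter and the same (ranges, start_idx) state.
-- `active[idx+1]` is ported as `active.getD (idx+1) false`: Python evaluates that lookup
-- only when idx ≠ len(active)-1 (short-circuit `or`), where it is in range, so getD is exact there.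
def groupLoopA (active : List Bool) (n : Int) : Nat → List Bool → (List (Int × Int) × Option Int) → (List (Int × Int) × Option Int)
  | _, [], s => s
  | idx, flag :: rest, (ranges, start0) =>
    let start := if flag && start0.isNone then some (idx : Int) else start0
    let s' : List (Int × Int) × Option Int :=
      match start with
      | none => (ranges, none)
      | some si =>
        if (idx : Int) = n - 1 || !(active.getD (idx + 1) false)
        then (ranges ++ [(si, (idx : Int))], none)
        else (ranges, some si)
    groupLoopA active n (idx + 1) rest s'

def group_active_ranges_py (active : List Bool) (metrics : List (List (String × Int))) : List (Int × Int) :=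
  (groupLoopA active (active.length : Int) 0 active ([], none)).1

-- ===== PORT B =====
-- inner while loop: length of the maximal leading run equal to b, and the remainder
def spanRun (b : Bool) : List Bool → Nat × List Bool
  | [] => (0, [])
  | x :: xs => if x = b then ((spanRun b xs).1 + 1, (spanRun b xs).2) else (0, x :: xs)

theorem spanRun_len (b : Bool) (xs : List Bool) : (spanRun b xs).2.length ≤ xs.length := by
  induction xs with
  | nil => simp [spanRun]
  | cons x xs ih => by_cases h : x = b <;> simp [spanRun, h] <;> omega

-- outer while loop: i is the current index, chunk off one run at a time
def goB (i : Int) : List Bool → List (Int × Int)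
  | [] => []
  | x :: xs =>
    let r := spanRun x xs
    let len : Int := (r.1 : Int) + 1
    (if x then [(i, i + len - 1)] else []) ++ goB (i + len) r.2
termination_by l => l.length
decreasing_by simp; exact spanRun_len _ _

def group_active_ranges_py_alt (active : List Bool) (metrics : List (List (String × Int))) : List (Int × Int) :=
  goB 0 active

-- ===== PRECONDITION & SPEC =====
def Spec_group_active_ranges_py (active : List Bool) (metrics : List (List (String × Int))) (out : List (Int × Int)) : Prop := out = group_active_ranges_py_alt active metrics
instance (active : List Bool) (metrics : List (List (String × Int))) (out : List (Int × Int)) : Decidable (Spec_group_active_ranges_py active metrics out) := by unfold Spec_group_active_ranges_py; infer_instance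

-- ===== CLAIM (what is proved, stated in full; the proofs are below) =====
def Claim_equal_group_active_ranges_py : Prop := ∀ (active : List Bool) (metrics : List (List (String × Int))), Dom_group_active_ranges_py active metrics → Spec_group_active_ranges_py active metrics (group_active_ranges_py active metrics)

-- ===== LEMMAS AND PROOFS =====

-- equation lemmas for the well-founded goB
theorem goB_nil (i : Int) : goB i [] = [] := by rw [goB]

theorem goB_cons (i : Int) (x : Bool) (xs : List Bool) :
    goB i (x :: xs)
      = (if x then [(i, i + (((spanRun x xs).1 : Int) + 1) - 1)] else [])
        ++ goB (i + (((spanRun x xs).1 : Int) + 1)) (spanRun x xs).2 := by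
  rw [goB]

-- Accumulator-free restatement of A's loop body on the suffix: the lookahead
-- `idx = n-1 or not active[idx+1]` becomes `rest.headD false = false`.
def fA : Nat → Option Int → List Bool → List (Int × Int)
  | _, _, [] => []
  | idx, start0, flag :: rest =>
    let start := if flag && start0.isNone then some (idx : Int) else start0
    match start with
    | none => fA (idx + 1) none rest
    | some si =>
      if rest.headD false = false then (si, (idx : Int)) :: fA (idx + 1) none rest
      else fA (idx + 1) (some si) rest

theorem groupLoopA_eq_fA (active : List Bool) :
    ∀ (rest : List Bool) (idx : Nat) (ranges : List (Int × Int)) (start : Option Int),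
      active.drop idx = rest →
      (groupLoopA active (active.length : Int) idx rest (ranges, start)).1 = ranges ++ fA idx start rest := by
  intro rest
  induction rest with
  | nil => intro idx ranges start h; simp [groupLoopA, fA]
  | cons flag tail ih =>
    intro idx ranges start h
    have htail : active.drop (idx + 1) = tail := by
      have := congrArg List.tail h
      simpa [List.tail_drop] using this
    have hlen : active.length = idx + 1 + tail.length := by
      have hL := congrArg List.length h
      have hle : idx ≤ active.length := by
        by_contra hc
        push_neg at hc
        simp [List.drop_eq_nil_of_le (le_of_lt hc)] at h
      simp [List.length_drop] at hL
      omega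
    have hget : active.getD (idx + 1) false = tail.headD false := by
      have h0 : (List.drop (idx + 1) active)[(0 : Nat)]? = active[idx + 1 + 0]? := List.getElem?_drop
      rw [htail] at h0
      cases tail with
      | nil => simp at h0; simp [List.getD, h0]
      | cons y ys => simp at h0; simp [List.getD, h0]
    have hcond : ((idx : Int) = (active.length : Int) - 1 || !(active.getD (idx + 1) false))
        = (decide (tail.headD false = false)) := by
      rw [hget]
      cases tail with
      | nil => simp
      | cons y ys =>
        have hne : ¬ ((idx : Int) = (active.length : Int) - 1) := by
          simp only [hlen, List.length_cons]
          push_cast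
          omega
        cases y <;> simp [hne]
    rw [groupLoopA]
    simp only [fA]
    cases hs : (if flag && start.isNone then some (idx : Int) else start) with
    | none =>
      exact ih (idx + 1) ranges none htail
    | some si =>
      simp only [hcond]
      cases hhd : tail.headD false with
      | false =>
        simp only [decide_true]
        simp
        rw [ih (idx + 1) (ranges ++ [(si, (idx : Int))]) none htail]
        simp
      | true =>
        simp
        exact ih (idx + 1) ranges (some si) htail

-- B skips a whole false run in one step; A skips it one element at a time.
theorem goB_false (i : Int) (xs : List Bool) : goB i (false :: xs) = goB (i + 1) xs := by
  cases xs with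
  | nil => simp [goB_cons, goB_nil, spanRun]
  | cons y ys =>
    cases y with
    | false =>
      rw [goB_cons, goB_cons]
      simp [spanRun]
      ring_nf
    | true =>
      rw [goB_cons]
      simp [spanRun]

-- A, once inside a true run started at s, walks to the run's end and emits (s, end).
theorem fA_run (xs : List Bool) : ∀ (s : Int) (idx : Nat),
    fA idx (some s) (true :: xs)
      = (s, (idx : Int) + ((spanRun true xs).1 : Int)) :: fA (idx + (spanRun true xs).1 + 1) none (spanRun true xs).2 := by
  induction xs with
  | nil => intro s idx; simp [fA, spanRun]
  | cons y ys ih =>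
    intro s idx
    cases y with
    | false => simp [fA, spanRun]
    | true =>
      have h1 : fA idx (some s) (true :: true :: ys) = fA (idx + 1) (some s) (true :: ys) := by
        simp [fA]
      rw [h1, ih s (idx + 1)]
      simp [spanRun]
      constructor
      · ring
      · have h2 : idx + 1 + (spanRun true ys).1 + 1 = idx + ((spanRun true ys).1 + 1) + 1 := by omega
        rw [h2]

theorem fA_eq_goB : ∀ (k : Nat) (l : List Bool), l.length ≤ k → ∀ (idx : Nat), fA idx none l = goB (idx : Int) l := by
  intro k
  induction k with
  | zero =>
    intro l hl idx
    have : l = [] := List.eq_nil_of_length_eq_zero (Nat.le_zero.mp hl)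
    subst this; simp [fA, goB_nil]
  | succ k ih =>
    intro l hl idx
    cases l with
    | nil => simp [fA, goB_nil]
    | cons flag xs =>
      simp only [List.length_cons, Nat.succ_le_succ_iff] at hl
      cases flag with
      | false =>
        have h1 : fA idx none (false :: xs) = fA (idx + 1) none xs := by simp [fA]
        rw [h1, ih xs hl (idx + 1), goB_false]
        push_cast
        ring_nf
      | true =>
        cases xs with
        | nil => simp [fA, goB_cons, goB_nil, spanRun]
        | cons y ys =>
          cases y with
          | false =>
            have h1 : fA idx none (true :: false :: ys) = ((idx : Int), (idx : Int)) :: fA (idx + 1) none (false :: ys) := by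
              simp [fA]
            rw [h1, ih (false :: ys) hl (idx + 1)]
            conv_rhs => rw [goB_cons]
            simp [spanRun]
          | true =>
            have h1 : fA idx none (true :: true :: ys) = fA (idx + 1) (some (idx : Int)) (true :: ys) := by
              simp [fA]
            rw [h1, fA_run]
            have hr := spanRun_len true ys
            rw [ih _ (by simp at hl; omega) (idx + 1 + (spanRun true ys).1 + 1)]
            rw [goB_cons]
            simp [spanRun]
            constructor
            · ring
            · ring_nf

-- ===== VERDICT (by name: the statement is the Claim_ definition above) =====
theorem group_active_ranges_py_spec : Claim_equal_group_active_ranges_py := by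
  intro active metrics _
  show group_active_ranges_py active metrics = group_active_ranges_py_alt active metrics
  unfold group_active_ranges_py group_active_ranges_py_alt
  rw [groupLoopA_eq_fA active active 0 [] none (by simp)]
  rw [fA_eq_goB active.length active (le_refl _) 0]
  simp
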